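-- pv_equiv track=rewrite | github.com/Akashssingh/BRCA-Restaging | brca_ocr_extract.py | derive_anatomic_stage
-- ===== SOURCE A (Python) =====
-- from typing import Optional
--
-- def derive_anatomic_stage(pT: str, pN: str, pM: str) -> Optional[str]:
--     """
--     Derive AJCC 8th Edition anatomic stage from pT/pN/pM strings.
--     Returns stage string or None if inputs are insufficient/ambiguous.
--     """
--     if not pT or not pN or not pM:
--         return None
--
--     t = pT.upper().replace("PT", "").replace("P", "").strip()
--     n = pN.upper().replace("PN", "").replace("P", "").strip()
--     m = pM.upper().replace("PM", "").replace("P", "").replace("C", "").strip()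
--
--     if "1" in m or m == "M1":
--         return "Stage IV"
--     if m not in ("M0", "0", "M0(I+)", "I+"):
--         return None  # can't determine
--
--     # T grouping
--     t_in = lambda *vals: any(t.startswith(v) or t == v for v in vals)
--     n_in = lambda *vals: any(n.startswith(v) or n == v for v in vals)
--
--     tis = t_in("IS", "TIS")
--     t0  = t_in("0")
--     t1  = t_in("1MI", "1A", "1B", "1C", "1") and not tis
--     t2  = t_in("2")
--     t3  = t_in("3")
--     t4  = t_in("4")
--
--     n0   = n_in("0")
--     n1mi = n_in("1MI")
--     n1   = n_in("1A", "1B", "1C") or (n_in("1") and not n1mi)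
--     n2   = n_in("2A", "2B") or n_in("2")
--     n3   = n_in("3A", "3B", "3C") or n_in("3")
--
--     if tis and n0:
--         return "Stage 0"
--     if t1 and n0:
--         return "Stage IA"
--     if (t0 or t1) and n1mi:
--         return "Stage IB"
--     if (t0 or t1) and n1:
--         return "Stage IIA"
--     if t2 and n0:
--         return "Stage IIA"
--     if t2 and n1:
--         return "Stage IIB"
--     if t3 and n0:
--         return "Stage IIB"
--     if (t0 or t1 or t2) and n2:
--         return "Stage IIIA"
--     if t3 and (n1 or n2):
--         return "Stage IIIA"
--     if t4 and (n0 or n1 or n2):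
--         return "Stage IIIB"
--     if n3:
--         return "Stage IIIC"
--
--     return None
-- ===== SOURCE B (Python) =====
-- from typing import Optional
--
-- # Table keyed by (t-category, n-category); n3 always dominates (Stage IIIC).
-- _T_PATTERNS = [("IS", "tis"), ("TIS", "tis"), ("0", "t0"), ("1", "t1"),
--                ("2", "t2"), ("3", "t3"), ("4", "t4")]
-- _N_PATTERNS = [("0", "n0"), ("1MI", "n1mi"), ("1", "n1"), ("2", "n2"), ("3", "n3")]
-- _STAGE_TABLE = {
--     ("tis", "n0"): "Stage 0",
--     ("t0", "n1mi"): "Stage IB", ("t0", "n1"): "Stage IIA", ("t0", "n2"): "Stage IIIA",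
--     ("t1", "n0"): "Stage IA", ("t1", "n1mi"): "Stage IB",
--     ("t1", "n1"): "Stage IIA", ("t1", "n2"): "Stage IIIA",
--     ("t2", "n0"): "Stage IIA", ("t2", "n1"): "Stage IIB", ("t2", "n2"): "Stage IIIA",
--     ("t3", "n0"): "Stage IIB", ("t3", "n1"): "Stage IIIA", ("t3", "n2"): "Stage IIIA",
--     ("t4", "n0"): "Stage IIIB", ("t4", "n1"): "Stage IIIB", ("t4", "n2"): "Stage IIIB",
-- }
--
-- def derive_anatomic_stage(pT: str, pN: str, pM: str) -> Optional[str]: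
--     """Categorize T and N once, then look the stage up in a table."""
--     if not pT or not pN or not pM:
--         return None
--     m = pM.upper().replace("PM", "").replace("P", "").replace("C", "").strip()
--     if "1" in m:
--         return "Stage IV"
--     if m not in ("M0", "0", "M0(I+)", "I+"):
--         return None
--     t = pT.upper().replace("PT", "").replace("P", "").strip()
--     n = pN.upper().replace("PN", "").replace("P", "").strip()
--     tcat = next((cat for pat, cat in _T_PATTERNS if t.startswith(pat)), None)
--     ncat = next((cat for pat, cat in _N_PATTERNS if n.startswith(pat)), None)
--     if ncat == "n3":
--         return "Stage IIIC"
--     return _STAGE_TABLE.get((tcat, ncat))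
-- ===== Notes on version B (the rewrite author's own statement) =====
-- stated objective: simpler
-- what changed: Replaced A's long first-match if-cascade over overlapping T/N boolean flags by computing one canonical T-category and one N-category via a single pattern list each, then a lookup in a (tcat, ncat) -> stage table, with n3 always yielding Stage IIIC and missing keys yielding None.
import Mathlib
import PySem

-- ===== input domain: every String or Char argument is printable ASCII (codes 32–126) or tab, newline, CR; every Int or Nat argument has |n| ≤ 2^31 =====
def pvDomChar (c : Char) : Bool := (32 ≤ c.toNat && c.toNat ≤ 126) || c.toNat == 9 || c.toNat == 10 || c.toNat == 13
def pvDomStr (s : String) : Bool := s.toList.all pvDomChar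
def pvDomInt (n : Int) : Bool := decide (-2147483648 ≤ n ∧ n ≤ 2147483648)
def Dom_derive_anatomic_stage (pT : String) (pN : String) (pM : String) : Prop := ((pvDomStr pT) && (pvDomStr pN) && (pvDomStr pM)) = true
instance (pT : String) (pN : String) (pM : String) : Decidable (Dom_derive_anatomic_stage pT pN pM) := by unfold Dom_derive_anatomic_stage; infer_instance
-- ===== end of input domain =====

-- B replaces A's long first-match if-cascade by a categorize-then-table-lookup (same values; objective: simpler).


-- ===== PORT A =====
def derive_anatomic_stage (pT : String) (pN : String) (pM : String) : Option String :=
  if pT == "" || pN == "" || pM == "" then none else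
  let t := PySem.Str.strip (PySem.Str.replace (PySem.Str.replace (PySem.Str.upper pT) "PT" "") "P" "")
  let n := PySem.Str.strip (PySem.Str.replace (PySem.Str.replace (PySem.Str.upper pN) "PN" "") "P" "")
  let m := PySem.Str.strip (PySem.Str.replace (PySem.Str.replace (PySem.Str.replace (PySem.Str.upper pM) "PM" "") "P" "") "C" "")
  if PySem.Str.isIn "1" m || m == "M1" then some "Stage IV" else
  if !(m == "M0" || m == "0" || m == "M0(I+)" || m == "I+") then none else
  let t_in := fun (vs : List String) => vs.any (fun v => PySem.Str.startswith t v || t == v)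
  let n_in := fun (vs : List String) => vs.any (fun v => PySem.Str.startswith n v || n == v)
  let tis := t_in ["IS", "TIS"]
  let t0 := t_in ["0"]
  let t1 := t_in ["1MI", "1A", "1B", "1C", "1"] && !tis
  let t2 := t_in ["2"]
  let t3 := t_in ["3"]
  let t4 := t_in ["4"]
  let n0 := n_in ["0"]
  let n1mi := n_in ["1MI"]
  let n1 := n_in ["1A", "1B", "1C"] || (n_in ["1"] && !n1mi)
  let n2 := n_in ["2A", "2B"] || n_in ["2"]
  let n3 := n_in ["3A", "3B", "3C"] || n_in ["3"]
  if tis && n0 then some "Stage 0" else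
  if t1 && n0 then some "Stage IA" else
  if (t0 || t1) && n1mi then some "Stage IB" else
  if (t0 || t1) && n1 then some "Stage IIA" else
  if t2 && n0 then some "Stage IIA" else
  if t2 && n1 then some "Stage IIB" else
  if t3 && n0 then some "Stage IIB" else
  if (t0 || t1 || t2) && n2 then some "Stage IIIA" else
  if t3 && (n1 || n2) then some "Stage IIIA" else
  if t4 && (n0 || n1 || n2) then some "Stage IIIB" else
  if n3 then some "Stage IIIC" else
  none

-- ===== PORT B =====
def pvTPatterns : List (String × String) :=
  [("IS", "tis"), ("TIS", "tis"), ("0", "t0"), ("1", "t1"), ("2", "t2"), ("3", "t3"), ("4", "t4")]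
def pvNPatterns : List (String × String) :=
  [("0", "n0"), ("1MI", "n1mi"), ("1", "n1"), ("2", "n2"), ("3", "n3")]
def pvStageTable : PySem.Dict (Option String × Option String) String :=
  PySem.Dict.ofList
  [((some "tis", some "n0"), "Stage 0"),
   ((some "t0", some "n1mi"), "Stage IB"), ((some "t0", some "n1"), "Stage IIA"), ((some "t0", some "n2"), "Stage IIIA"),
   ((some "t1", some "n0"), "Stage IA"), ((some "t1", some "n1mi"), "Stage IB"),
   ((some "t1", some "n1"), "Stage IIA"), ((some "t1", some "n2"), "Stage IIIA"),
   ((some "t2", some "n0"), "Stage IIA"), ((some "t2", some "n1"), "Stage IIB"), ((some "t2", some "n2"), "Stage IIIA"),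
   ((some "t3", some "n0"), "Stage IIB"), ((some "t3", some "n1"), "Stage IIIA"), ((some "t3", some "n2"), "Stage IIIA"),
   ((some "t4", some "n0"), "Stage IIIB"), ((some "t4", some "n1"), "Stage IIIB"), ((some "t4", some "n2"), "Stage IIIB")]

def derive_anatomic_stage_alt (pT : String) (pN : String) (pM : String) : Option String :=
  if pT == "" || pN == "" || pM == "" then none else
  let m := PySem.Str.strip (PySem.Str.replace (PySem.Str.replace (PySem.Str.replace (PySem.Str.upper pM) "PM" "") "P" "") "C" "")
  if PySem.Str.isIn "1" m then some "Stage IV" else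
  if !(m == "M0" || m == "0" || m == "M0(I+)" || m == "I+") then none else
  let t := PySem.Str.strip (PySem.Str.replace (PySem.Str.replace (PySem.Str.upper pT) "PT" "") "P" "")
  let n := PySem.Str.strip (PySem.Str.replace (PySem.Str.replace (PySem.Str.upper pN) "PN" "") "P" "")
  let tcat := (pvTPatterns.find? (fun pc => PySem.Str.startswith t pc.1)).map Prod.snd
  let ncat := (pvNPatterns.find? (fun pc => PySem.Str.startswith n pc.1)).map Prod.snd
  if ncat == some "n3" then some "Stage IIIC" else
  PySem.Dict.get? pvStageTable (tcat, ncat)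

-- ===== PRECONDITION & SPEC =====
def Spec_derive_anatomic_stage (pT : String) (pN : String) (pM : String) (out : Option String) : Prop := out = derive_anatomic_stage_alt pT pN pM
instance (pT : String) (pN : String) (pM : String) (out : Option String) : Decidable (Spec_derive_anatomic_stage pT pN pM out) := by unfold Spec_derive_anatomic_stage; infer_instance

-- ===== CLAIM (what is proved, stated in full; the proofs are below) =====
def Claim_equal_derive_anatomic_stage : Prop := ∀ (pT : String) (pN : String) (pM : String), Dom_derive_anatomic_stage pT pN pM → Spec_derive_anatomic_stage pT pN pM (derive_anatomic_stage pT pN pM)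

-- ===== LEMMAS AND PROOFS =====

-- the redundant equality disjunct in A's t_in/n_in: s == v already implies startswith
lemma sw_or_eq (s v : String) :
    (PySem.Chars.startswith s.toList v.toList || s == v) = PySem.Chars.startswith s.toList v.toList := by
  cases h : (s == v)
  · simp
  · have : s = v := by simpa using h
    subst this
    simp [PySem.Chars.startswith_iff]

lemma sw_mono (l p q : List Char) (h : p <+: q)
    (hq : PySem.Chars.startswith l q = true) : PySem.Chars.startswith l p = true := by
  rw [PySem.Chars.startswith_iff] at hq ⊢
  exact h.trans hq

lemma sw_incomp (l p q : List Char) (h1 : ¬ p <+: q) (h2 : ¬ q <+: p)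
    (hp : PySem.Chars.startswith l p = true) : PySem.Chars.startswith l q = false := by
  by_contra hc
  have hq : PySem.Chars.startswith l q = true := by
    cases h : PySem.Chars.startswith l q <;> simp_all
  rw [PySem.Chars.startswith_iff] at hp hq
  rcases List.prefix_or_prefix_of_prefix hp hq with h | h
  · exact h1 h
  · exact h2 h

-- the heart of the proof: on any normalized t/n, A's cascade equals B's categorize-and-look-up
set_option maxHeartbeats 4000000 in
lemma cascade_eq (t n : String) :
    (let t_in := fun (vs : List String) => vs.any (fun v => PySem.Str.startswith t v || t == v)
     let n_in := fun (vs : List String) => vs.any (fun v => PySem.Str.startswith n v || n == v)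
     let tis := t_in ["IS", "TIS"]
     let t0 := t_in ["0"]
     let t1 := t_in ["1MI", "1A", "1B", "1C", "1"] && !tis
     let t2 := t_in ["2"]
     let t3 := t_in ["3"]
     let t4 := t_in ["4"]
     let n0 := n_in ["0"]
     let n1mi := n_in ["1MI"]
     let n1 := n_in ["1A", "1B", "1C"] || (n_in ["1"] && !n1mi)
     let n2 := n_in ["2A", "2B"] || n_in ["2"]
     let n3 := n_in ["3A", "3B", "3C"] || n_in ["3"]
     if tis && n0 then some "Stage 0" else
     if t1 && n0 then some "Stage IA" else
     if (t0 || t1) && n1mi then some "Stage IB" else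
     if (t0 || t1) && n1 then some "Stage IIA" else
     if t2 && n0 then some "Stage IIA" else
     if t2 && n1 then some "Stage IIB" else
     if t3 && n0 then some "Stage IIB" else
     if (t0 || t1 || t2) && n2 then some "Stage IIIA" else
     if t3 && (n1 || n2) then some "Stage IIIA" else
     if t4 && (n0 || n1 || n2) then some "Stage IIIB" else
     if n3 then some "Stage IIIC" else
     none) =
    (let tcat := (pvTPatterns.find? (fun pc => PySem.Str.startswith t pc.1)).map Prod.snd
     let ncat := (pvNPatterns.find? (fun pc => PySem.Str.startswith n pc.1)).map Prod.snd
     if ncat == some "n3" then some "Stage IIIC" else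
     PySem.Dict.get? pvStageTable (tcat, ncat)) := by
  simp only [List.any, Bool.or_false, sw_or_eq, pvTPatterns, pvNPatterns, List.find?, PySem.Str.startswith_eq]
  generalize t.toList = lt
  generalize n.toList = ln
  have e_t1 : (PySem.Chars.startswith lt "1MI".toList || (PySem.Chars.startswith lt "1A".toList || (PySem.Chars.startswith lt "1B".toList || (PySem.Chars.startswith lt "1C".toList || PySem.Chars.startswith lt "1".toList)))) = PySem.Chars.startswith lt "1".toList := by
    cases h : PySem.Chars.startswith lt "1".toList
    · have h1 := sw_mono lt "1".toList "1MI".toList (by decide)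
      have h2 := sw_mono lt "1".toList "1A".toList (by decide)
      have h3 := sw_mono lt "1".toList "1B".toList (by decide)
      have h4 := sw_mono lt "1".toList "1C".toList (by decide)
      simp_all
    · simp
  have e_n1 : ((PySem.Chars.startswith ln "1A".toList || (PySem.Chars.startswith ln "1B".toList || PySem.Chars.startswith ln "1C".toList)) || (PySem.Chars.startswith ln "1".toList && !PySem.Chars.startswith ln "1MI".toList)) = (PySem.Chars.startswith ln "1".toList && !PySem.Chars.startswith ln "1MI".toList) := by
    cases hmi : PySem.Chars.startswith ln "1MI".toList
    · cases h : PySem.Chars.startswith ln "1".toList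
      · have h2 := sw_mono ln "1".toList "1A".toList (by decide)
        have h3 := sw_mono ln "1".toList "1B".toList (by decide)
        have h4 := sw_mono ln "1".toList "1C".toList (by decide)
        simp_all
      · simp
    · have h2 := sw_incomp ln "1MI".toList "1A".toList (by decide) (by decide) hmi
      have h3 := sw_incomp ln "1MI".toList "1B".toList (by decide) (by decide) hmi
      have h4 := sw_incomp ln "1MI".toList "1C".toList (by decide) (by decide) hmi
      simp_all
  have e_n2 : ((PySem.Chars.startswith ln "2A".toList || PySem.Chars.startswith ln "2B".toList) || PySem.Chars.startswith ln "2".toList) = PySem.Chars.startswith ln "2".toList := by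
    cases h : PySem.Chars.startswith ln "2".toList
    · have h2 := sw_mono ln "2".toList "2A".toList (by decide)
      have h3 := sw_mono ln "2".toList "2B".toList (by decide)
      simp_all
    · simp
  have e_n3 : ((PySem.Chars.startswith ln "3A".toList || (PySem.Chars.startswith ln "3B".toList || PySem.Chars.startswith ln "3C".toList)) || PySem.Chars.startswith ln "3".toList) = PySem.Chars.startswith ln "3".toList := by
    cases h : PySem.Chars.startswith ln "3".toList
    · have h2 := sw_mono ln "3".toList "3A".toList (by decide)
      have h3 := sw_mono ln "3".toList "3B".toList (by decide)
      have h4 := sw_mono ln "3".toList "3C".toList (by decide)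
      simp_all
    · simp
  simp only [e_t1, e_n1, e_n2, e_n3]
  have fT1 := sw_incomp lt "IS".toList "TIS".toList (by decide) (by decide)
  have fT2 := sw_incomp lt "IS".toList "0".toList (by decide) (by decide)
  have fT3 := sw_incomp lt "IS".toList "1".toList (by decide) (by decide)
  have fT4 := sw_incomp lt "IS".toList "2".toList (by decide) (by decide)
  have fT5 := sw_incomp lt "IS".toList "3".toList (by decide) (by decide)
  have fT6 := sw_incomp lt "IS".toList "4".toList (by decide) (by decide)
  have fT7 := sw_incomp lt "TIS".toList "0".toList (by decide) (by decide)
  have fT8 := sw_incomp lt "TIS".toList "1".toList (by decide) (by decide)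
  have fT9 := sw_incomp lt "TIS".toList "2".toList (by decide) (by decide)
  have fT10 := sw_incomp lt "TIS".toList "3".toList (by decide) (by decide)
  have fT11 := sw_incomp lt "TIS".toList "4".toList (by decide) (by decide)
  have fT12 := sw_incomp lt "0".toList "1".toList (by decide) (by decide)
  have fT13 := sw_incomp lt "0".toList "2".toList (by decide) (by decide)
  have fT14 := sw_incomp lt "0".toList "3".toList (by decide) (by decide)
  have fT15 := sw_incomp lt "0".toList "4".toList (by decide) (by decide)
  have fT16 := sw_incomp lt "1".toList "2".toList (by decide) (by decide)
  have fT17 := sw_incomp lt "1".toList "3".toList (by decide) (by decide)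
  have fT18 := sw_incomp lt "1".toList "4".toList (by decide) (by decide)
  have fT19 := sw_incomp lt "2".toList "3".toList (by decide) (by decide)
  have fT20 := sw_incomp lt "2".toList "4".toList (by decide) (by decide)
  have fT21 := sw_incomp lt "3".toList "4".toList (by decide) (by decide)
  have fN1 := sw_incomp ln "0".toList "1MI".toList (by decide) (by decide)
  have fN2 := sw_incomp ln "0".toList "1".toList (by decide) (by decide)
  have fN3 := sw_incomp ln "0".toList "2".toList (by decide) (by decide)
  have fN4 := sw_incomp ln "0".toList "3".toList (by decide) (by decide)
  have fN5 := sw_incomp ln "1".toList "2".toList (by decide) (by decide)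
  have fN6 := sw_incomp ln "1".toList "3".toList (by decide) (by decide)
  have fN7 := sw_incomp ln "2".toList "3".toList (by decide) (by decide)
  have fN8 := sw_incomp ln "1MI".toList "2".toList (by decide) (by decide)
  have fN9 := sw_incomp ln "1MI".toList "3".toList (by decide) (by decide)
  have fNm := sw_mono ln "1".toList "1MI".toList (by decide)
  revert fT1 fT2 fT3 fT4 fT5 fT6 fT7 fT8 fT9 fT10 fT11 fT12 fT13 fT14 fT15 fT16 fT17 fT18 fT19 fT20 fT21 fN1 fN2 fN3 fN4 fN5 fN6 fN7 fN8 fN9 fNm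
  generalize PySem.Chars.startswith lt "IS".toList = bT0
  generalize PySem.Chars.startswith lt "TIS".toList = bT1
  generalize PySem.Chars.startswith lt "0".toList = bT2
  generalize PySem.Chars.startswith lt "1".toList = bT3
  generalize PySem.Chars.startswith lt "2".toList = bT4
  generalize PySem.Chars.startswith lt "3".toList = bT5
  generalize PySem.Chars.startswith lt "4".toList = bT6
  generalize PySem.Chars.startswith ln "0".toList = bN0
  generalize PySem.Chars.startswith ln "1MI".toList = bN1
  generalize PySem.Chars.startswith ln "1".toList = bN2
  generalize PySem.Chars.startswith ln "2".toList = bN3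
  generalize PySem.Chars.startswith ln "3".toList = bN4
  intro fT1 fT2 fT3 fT4 fT5 fT6 fT7 fT8 fT9 fT10 fT11 fT12 fT13 fT14 fT15 fT16 fT17 fT18 fT19 fT20 fT21 fN1 fN2 fN3 fN4 fN5 fN6 fN7 fN8 fN9 fNm
  have hfT1 : (!bT0 || !bT1) = true := by
    cases hx : bT0
    · simp
    · simp [fT1 hx]
  have hfT2 : (!bT0 || !bT2) = true := by
    cases hx : bT0
    · simp
    · simp [fT2 hx]
  have hfT3 : (!bT0 || !bT3) = true := by
    cases hx : bT0
    · simp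
    · simp [fT3 hx]
  have hfT4 : (!bT0 || !bT4) = true := by
    cases hx : bT0
    · simp
    · simp [fT4 hx]
  have hfT5 : (!bT0 || !bT5) = true := by
    cases hx : bT0
    · simp
    · simp [fT5 hx]
  have hfT6 : (!bT0 || !bT6) = true := by
    cases hx : bT0
    · simp
    · simp [fT6 hx]
  have hfT7 : (!bT1 || !bT2) = true := by
    cases hx : bT1
    · simp
    · simp [fT7 hx]
  have hfT8 : (!bT1 || !bT3) = true := by
    cases hx : bT1
    · simp
    · simp [fT8 hx]
  have hfT9 : (!bT1 || !bT4) = true := by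
    cases hx : bT1
    · simp
    · simp [fT9 hx]
  have hfT10 : (!bT1 || !bT5) = true := by
    cases hx : bT1
    · simp
    · simp [fT10 hx]
  have hfT11 : (!bT1 || !bT6) = true := by
    cases hx : bT1
    · simp
    · simp [fT11 hx]
  have hfT12 : (!bT2 || !bT3) = true := by
    cases hx : bT2
    · simp
    · simp [fT12 hx]
  have hfT13 : (!bT2 || !bT4) = true := by
    cases hx : bT2
    · simp
    · simp [fT13 hx]
  have hfT14 : (!bT2 || !bT5) = true := by
    cases hx : bT2
    · simp
    · simp [fT14 hx]
  have hfT15 : (!bT2 || !bT6) = true := by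
    cases hx : bT2
    · simp
    · simp [fT15 hx]
  have hfT16 : (!bT3 || !bT4) = true := by
    cases hx : bT3
    · simp
    · simp [fT16 hx]
  have hfT17 : (!bT3 || !bT5) = true := by
    cases hx : bT3
    · simp
    · simp [fT17 hx]
  have hfT18 : (!bT3 || !bT6) = true := by
    cases hx : bT3
    · simp
    · simp [fT18 hx]
  have hfT19 : (!bT4 || !bT5) = true := by
    cases hx : bT4
    · simp
    · simp [fT19 hx]
  have hfT20 : (!bT4 || !bT6) = true := by
    cases hx : bT4
    · simp
    · simp [fT20 hx]
  have hfT21 : (!bT5 || !bT6) = true := by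
    cases hx : bT5
    · simp
    · simp [fT21 hx]
  have hfN1 : (!bN0 || !bN1) = true := by
    cases hx : bN0
    · simp
    · simp [fN1 hx]
  have hfN2 : (!bN0 || !bN2) = true := by
    cases hx : bN0
    · simp
    · simp [fN2 hx]
  have hfN3 : (!bN0 || !bN3) = true := by
    cases hx : bN0
    · simp
    · simp [fN3 hx]
  have hfN4 : (!bN0 || !bN4) = true := by
    cases hx : bN0
    · simp
    · simp [fN4 hx]
  have hfN5 : (!bN2 || !bN3) = true := by
    cases hx : bN2
    · simp
    · simp [fN5 hx]
  have hfN6 : (!bN2 || !bN4) = true := by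
    cases hx : bN2
    · simp
    · simp [fN6 hx]
  have hfN7 : (!bN3 || !bN4) = true := by
    cases hx : bN3
    · simp
    · simp [fN7 hx]
  have hfN8 : (!bN1 || !bN3) = true := by
    cases hx : bN1
    · simp
    · simp [fN8 hx]
  have hfN9 : (!bN1 || !bN4) = true := by
    cases hx : bN1
    · simp
    · simp [fN9 hx]
  have hfNm : (!bN1 || bN2) = true := by
    cases hx : bN1
    · simp
    · simp [fNm hx]
  have H : ((!bT0 || !bT1) && (!bT0 || !bT2) && (!bT0 || !bT3) && (!bT0 || !bT4) && (!bT0 || !bT5) && (!bT0 || !bT6) && (!bT1 || !bT2) && (!bT1 || !bT3) && (!bT1 || !bT4) && (!bT1 || !bT5) && (!bT1 || !bT6) && (!bT2 || !bT3) && (!bT2 || !bT4) && (!bT2 || !bT5) && (!bT2 || !bT6) && (!bT3 || !bT4) && (!bT3 || !bT5) && (!bT3 || !bT6) && (!bT4 || !bT5) && (!bT4 || !bT6) && (!bT5 || !bT6) && (!bN0 || !bN1) && (!bN0 || !bN2) && (!bN0 || !bN3) && (!bN0 || !bN4) && (!bN2 || !bN3) && (!bN2 || !bN4) && (!bN3 ||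 !bN4) && (!bN1 || !bN3) && (!bN1 || !bN4) && (!bN1 || bN2)) = true := by
    simp only [Bool.and_eq_true]
    exact ⟨⟨⟨⟨⟨⟨⟨⟨⟨⟨⟨⟨⟨⟨⟨⟨⟨⟨⟨⟨⟨⟨⟨⟨⟨⟨⟨⟨⟨⟨hfT1, hfT2⟩, hfT3⟩, hfT4⟩, hfT5⟩, hfT6⟩, hfT7⟩, hfT8⟩, hfT9⟩, hfT10⟩, hfT11⟩, hfT12⟩, hfT13⟩, hfT14⟩, hfT15⟩, hfT16⟩, hfT17⟩, hfT18⟩, hfT19⟩, hfT20⟩, hfT21⟩, hfN1⟩, hfN2⟩, hfN3⟩, hfN4⟩, hfN5⟩, hfN6⟩, hfN7⟩, hfN8⟩, hfN9⟩, hfNm⟩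
  clear fT1 fT2 fT3 fT4 fT5 fT6 fT7 fT8 fT9 fT10 fT11 fT12 fT13 fT14 fT15 fT16 fT17 fT18 fT19 fT20 fT21 fN1 fN2 fN3 fN4 fN5 fN6 fN7 fN8 fN9 fNm hfT1 hfT2 hfT3 hfT4 hfT5 hfT6 hfT7 hfT8 hfT9 hfT10 hfT11 hfT12 hfT13 hfT14 hfT15 hfT16 hfT17 hfT18 hfT19 hfT20 hfT21 hfN1 hfN2 hfN3 hfN4 hfN5 hfN6 hfN7 hfN8 hfN9 hfNm
  revert bT0 bT1 bT2 bT3 bT4 bT5 bT6 bN0 bN1 bN2 bN3 bN4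
  decide


lemma tail_eq (m t n : String) :
    (if (PySem.Str.isIn "1" m || m == "M1") = true then some "Stage IV" else
     if (!(m == "M0" || m == "0" || m == "M0(I+)" || m == "I+")) = true then none else
     (let t_in := fun (vs : List String) => vs.any (fun v => PySem.Str.startswith t v || t == v)
     let n_in := fun (vs : List String) => vs.any (fun v => PySem.Str.startswith n v || n == v)
     let tis := t_in ["IS", "TIS"]
     let t0 := t_in ["0"]
     let t1 := t_in ["1MI", "1A", "1B", "1C", "1"] && !tis
     let t2 := t_in ["2"]
     let t3 := t_in ["3"]
     let t4 := t_in ["4"]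
     let n0 := n_in ["0"]
     let n1mi := n_in ["1MI"]
     let n1 := n_in ["1A", "1B", "1C"] || (n_in ["1"] && !n1mi)
     let n2 := n_in ["2A", "2B"] || n_in ["2"]
     let n3 := n_in ["3A", "3B", "3C"] || n_in ["3"]
     if tis && n0 then some "Stage 0" else
     if t1 && n0 then some "Stage IA" else
     if (t0 || t1) && n1mi then some "Stage IB" else
     if (t0 || t1) && n1 then some "Stage IIA" else
     if t2 && n0 then some "Stage IIA" else
     if t2 && n1 then some "Stage IIB" else
     if t3 && n0 then some "Stage IIB" else
     if (t0 || t1 || t2) && n2 then some "Stage IIIA" else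
     if t3 && (n1 || n2) then some "Stage IIIA" else
     if t4 && (n0 || n1 || n2) then some "Stage IIIB" else
     if n3 then some "Stage IIIC" else
     none)) =
    (if (PySem.Str.isIn "1" m) = true then some "Stage IV" else
     if (!(m == "M0" || m == "0" || m == "M0(I+)" || m == "I+")) = true then none else
     (let tcat := (pvTPatterns.find? (fun pc => PySem.Str.startswith t pc.1)).map Prod.snd
     let ncat := (pvNPatterns.find? (fun pc => PySem.Str.startswith n pc.1)).map Prod.snd
     if ncat == some "n3" then some "Stage IIIC" else
     PySem.Dict.get? pvStageTable (tcat, ncat))) := by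
  have hM : (PySem.Str.isIn "1" m || m == "M1") = PySem.Str.isIn "1" m := by
    cases h : (m == "M1")
    · simp
    · have hm : m = "M1" := by simpa using h
      subst hm
      decide
  rw [hM]
  cases h1 : PySem.Str.isIn "1" m
  · cases h2 : (!(m == "M0" || m == "0" || m == "M0(I+)" || m == "I+"))
    · simp only [Bool.false_eq_true, if_false]
      exact cascade_eq t n
    · simp
  · simp

-- ===== VERDICT (by name: the statement is the Claim_ definition above) =====
theorem derive_anatomic_stage_spec : Claim_equal_derive_anatomic_stage := by
  intro pT pN pM _
  unfold Spec_derive_anatomic_stage derive_anatomic_stage derive_anatomic_stage_alt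
  by_cases h0 : (pT == "" || pN == "" || pM == "") = true
  · simp [h0]
  · simp only [h0, Bool.false_eq_true, if_false]
    exact tail_eq _ _ _
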